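-- pv_equiv track=rewrite | github.com/arp9901/vimpp | algorithm.py | apply_left_right
-- ===== SOURCE A (Python) =====
-- def apply_left_right(center, sightly_left, sightly_right, left, right):
--     # center
--     c = 1
--     output = 1
--
--     if c:
--         for i in range(len(center)-2):
--             if center[i] == center[i+1] == center[i+2] == 0:
--                 output = 0
--                 break
--         if output:
--             c = 0
--             return "straight"
--         else:
--             c = 1
--             output = 1
--
--     # sightly left
--     if c:
--         for i in range(len(sightly_left)-2):
--             if sightly_left[i] == sightly_left[i+1] == sightly_left[i+2] == 0:
--                 output = 0
--                 break
--         if output: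
--             c = 0
--             return "sl"
--         else:
--             c = 1
--             output = 1
--
--     # sightly right
--     if c:
--         for i in range(len(sightly_right)-2):
--             if sightly_right[i] == sightly_right[i+1] == sightly_right[i+2] == 0:
--                 output = 0
--                 break
--         if output:
--             c = 0
--             return "sr"
--         else:
--             c = 1
--             output = 1
--
--     # left
--     if c:
--         for i in range(len(left)-2):
--             if left[i] == left[i+1] == left[i+2] == 0:
--                 output = 0
--                 break
--         if output:
--             c = 0
--             return "l"
--         else:
--             c = 1
--             output = 1
--
--     # right
--     if c:
--         for i in range(len(right)-2):
--             if right[i] == right[i+1] == right[i+2] == 0: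
--                 output = 0
--                 break
--         if output:
--             c = 0
--             return "r"
--         else:
--             c = 1
--             output = 1
--
--     # Stop
--     if c:
--         return "stop"
-- ===== SOURCE B (Python) =====
-- def _lacks_triple(lst):
--     # positions of nonzero entries, with sentinel marks at -1 and len(lst);
--     # a run of >= 3 zeros exists iff two consecutive marks are more than 3 apart
--     marks = [-1] + [i for i, x in enumerate(lst) if x != 0] + [len(lst)]
--     return all(b - a <= 3 for a, b in zip(marks, marks[1:]))
--
--
-- def apply_left_right(center, sightly_left, sightly_right, left, right):
--     for label, lst in zip(("straight", "sl", "sr", "l", "r"),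
--                           (center, sightly_left, sightly_right, left, right)):
--         if _lacks_triple(lst):
--             return label
--     return "stop"
-- ===== Notes on version B (the rewrite author's own statement) =====
-- stated objective: alternative
-- what changed: Instead of scanning each list for a zero window/run, B collects the positions of the nonzero entries (with sentinels -1 and len) and detects a triple of zeros as two consecutive marks more than 3 apart, picking the first label via a data-driven loop over (label, list) pairs.
import Mathlib
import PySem

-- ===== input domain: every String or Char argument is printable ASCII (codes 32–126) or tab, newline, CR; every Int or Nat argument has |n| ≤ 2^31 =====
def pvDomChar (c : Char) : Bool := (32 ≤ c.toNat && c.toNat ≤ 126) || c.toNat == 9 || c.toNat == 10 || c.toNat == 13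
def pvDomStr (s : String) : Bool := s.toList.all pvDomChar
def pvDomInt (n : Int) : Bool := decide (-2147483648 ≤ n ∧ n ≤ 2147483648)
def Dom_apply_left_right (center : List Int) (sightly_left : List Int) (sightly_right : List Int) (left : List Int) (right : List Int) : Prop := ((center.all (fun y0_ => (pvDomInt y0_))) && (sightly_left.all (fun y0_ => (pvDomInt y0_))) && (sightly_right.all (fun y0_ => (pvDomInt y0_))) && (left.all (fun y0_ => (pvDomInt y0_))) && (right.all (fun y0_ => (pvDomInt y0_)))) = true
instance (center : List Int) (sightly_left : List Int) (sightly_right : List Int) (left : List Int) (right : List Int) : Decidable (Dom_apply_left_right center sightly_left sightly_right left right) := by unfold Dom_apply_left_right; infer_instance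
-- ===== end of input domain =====

-- B detects a triple of zeros from the gaps between nonzero positions (with sentinel
-- marks -1 and len) instead of A's per-window index scans (objective: alternative).


-- ===== PORT A =====
-- the body of each of A's five identical 'for i in range(len(lst)-2)' break-loops:
-- walks the index list, sets output = 0 and breaks on the first triple of zeros
def pvTripA (lst : List Int) (i : Int) : Bool :=
  PySem.List.pyGet? lst i == some 0 && PySem.List.pyGet? lst (i + 1) == some 0
    && PySem.List.pyGet? lst (i + 2) == some 0

def pvLoopA (lst : List Int) : List Int → Int
  | [] => 1                                   -- loop ends without break: output stays 1
  | i :: rest => if pvTripA lst i then 0 else pvLoopA lst rest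

-- 'output' after one of A's loops (output initialised to 1, indices range(len(lst)-2))
def pvScanA (lst : List Int) : Int :=
  pvLoopA lst (PySem.List.pyRange 0 ((lst.length : Int) - 2) 1)

def apply_left_right (center : List Int) (sightly_left : List Int) (sightly_right : List Int) (left : List Int) (right : List Int) : String :=
  -- c is 1 at every 'if c:'; each block returns when its output is truthy, else resets
  if pvScanA center ≠ 0 then "straight"
  else if pvScanA sightly_left ≠ 0 then "sl"
  else if pvScanA sightly_right ≠ 0 then "sr"
  else if pvScanA left ≠ 0 then "l"
  else if pvScanA right ≠ 0 then "r"
  else "stop"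

-- ===== PORT B =====
-- [i for i, x in enumerate(lst) if x != 0]: the comprehension, carrying enumerate's index
def pvIdxFrom (i : Int) : List Int → List Int
  | [] => []
  | x :: t => if x ≠ 0 then i :: pvIdxFrom (i + 1) t else pvIdxFrom (i + 1) t

-- marks = [-1] + nonzero positions + [len(lst)]
def pvMarks (lst : List Int) : List Int :=
  -1 :: (pvIdxFrom 0 lst ++ [(lst.length : Int)])

-- all(b - a <= 3 for a, b in zip(marks, marks[1:]))
def pvLacks (lst : List Int) : Bool :=
  ((pvMarks lst).zip (pvMarks lst).tail).all (fun p => decide (p.2 - p.1 ≤ 3))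

-- the for-loop over the zipped (label, list) pairs
def pvPickB : List (String × List Int) → String
  | [] => "stop"
  | (label, lst) :: rest => if pvLacks lst then label else pvPickB rest

def apply_left_right_alt (center : List Int) (sightly_left : List Int) (sightly_right : List Int) (left : List Int) (right : List Int) : String :=
  pvPickB [("straight", center), ("sl", sightly_left), ("sr", sightly_right),
           ("l", left), ("r", right)]

-- ===== PRECONDITION & SPEC =====
def Spec_apply_left_right (center : List Int) (sightly_left : List Int) (sightly_right : List Int) (left : List Int) (right : List Int) (out : String) : Prop := out = apply_left_right_alt center sightly_left sightly_right left right
instance (center : List Int) (sightly_left : List Int) (sightly_right : List Int) (left : List Int) (right : List Int) (out : String) : Decidable (Spec_apply_left_right center sightly_left sightly_right left right out) := by unfold Spec_apply_left_right; infer_instance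

-- ===== CLAIM (what is proved, stated in full; the proofs are below) =====
def Claim_equal_apply_left_right : Prop := ∀ (center : List Int) (sightly_left : List Int) (sightly_right : List Int) (left : List Int) (right : List Int), Dom_apply_left_right center sightly_left sightly_right left right → Spec_apply_left_right center sightly_left sightly_right left right (apply_left_right center sightly_left sightly_right left right)

-- ===== LEMMAS AND PROOFS =====

-- reference characterisation: lst contains three consecutive zeros
def hasTriple : List Int → Bool
  | a :: b :: c :: t => (a == 0 && b == 0 && c == 0) || hasTriple (b :: c :: t)
  | _ => false

def tripN (lst : List Int) (k : Nat) : Bool :=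
  lst[k]? == some 0 && lst[k+1]? == some 0 && lst[k+2]? == some 0

theorem pvLoopA_any (lst : List Int) (ids : List Int) :
    pvLoopA lst ids = if ids.any (pvTripA lst) then 0 else 1 := by
  induction ids with
  | nil => simp [pvLoopA]
  | cons i rest ih => by_cases h : pvTripA lst i <;> simp [pvLoopA, h, ih]

theorem any_range_tripN (lst : List Int) :
    (List.range (lst.length - 2)).any (tripN lst) = hasTriple lst := by
  induction lst using hasTriple.induct with
  | case1 a b c t ih =>
      have hlen : (a :: b :: c :: t).length - 2 = t.length + 1 := by simp
      rw [hlen, List.range_succ_eq_map, hasTriple]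
      simp only [List.any_cons, List.any_map]
      have h0 : tripN (a :: b :: c :: t) 0 = (a == 0 && b == 0 && c == 0) := by
        simp [tripN]
      have hshift : (List.range t.length).any (tripN (a :: b :: c :: t) ∘ Nat.succ)
          = (List.range t.length).any (tripN (b :: c :: t)) :=
        List.any_congr rfl (fun k => by simp [tripN])
      have hlen' : (b :: c :: t).length - 2 = t.length := by simp
      rw [h0, hshift, ← hlen', ih]
  | case2 l h =>
      rcases l with _ | ⟨a, _ | ⟨b, _ | ⟨c, t⟩⟩⟩
      · simp [hasTriple]
      · simp [hasTriple]
      · simp [hasTriple]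
      · exact absurd trivial (by exact fun _ => h a b c t rfl)

theorem pvScanA_eq (lst : List Int) :
    pvScanA lst = if hasTriple lst then 0 else 1 := by
  rw [pvScanA, pvLoopA_any, PySem.List.pyRange_one]
  have hT : ((lst.length : Int) - 2 - 0).toNat = lst.length - 2 := by omega
  rw [hT, List.any_map]
  have hpt : ∀ k : Nat, (pvTripA lst ∘ fun k : Nat => (0 : Int) + k) k = tripN lst k := by
    intro k
    simp only [Function.comp, pvTripA, tripN, zero_add]
    have h1 : (k : Int) + 1 = ((k + 1 : Nat) : Int) := by push_cast; ring
    have h2 : (k : Int) + 2 = ((k + 2 : Nat) : Int) := by push_cast; ring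
    rw [h1, h2]
    simp only [PySem.List.pyGet?_natCast]
  rw [List.any_congr rfl hpt, any_range_tripN]

-- proof-side run-length scan: pending run of r zeros; true iff the run reaches 3
def runScan (r : Int) : List Int → Bool
  | [] => false
  | x :: rest =>
      let r' := if x = 0 then r + 1 else 0
      if r' ≥ 3 then true else runScan r' rest

theorem hasTriple_cons_ne (x : Int) (t : List Int) (hx : x ≠ 0) :
    hasTriple (x :: t) = hasTriple t := by
  match t with
  | [] => simp [hasTriple]
  | [b] => simp [hasTriple]
  | b :: c :: t' => simp [hasTriple, hx]

theorem runScan_eq (lst : List Int) :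
    ∀ r : Nat, r ≤ 2 → runScan (r : Int) lst = hasTriple (List.replicate r 0 ++ lst) := by
  induction lst with
  | nil =>
      intro r hr
      interval_cases r <;> simp [runScan, hasTriple]
  | cons x t ih =>
      intro r hr
      by_cases hx : x = 0
      · subst hx
        by_cases h2 : r = 2
        · subst h2
          simp [runScan, hasTriple]
        · have hr1 : r + 1 ≤ 2 := by omega
          have hlt : ¬ ((r : Int) + 1 ≥ 3) := by omega
          have key : runScan ((r : Int) + 1) t = hasTriple (List.replicate (r + 1) 0 ++ t) := by
            rw [show ((r : Int) + 1) = ((r + 1 : Nat) : Int) by push_cast; ring]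
            exact ih (r + 1) hr1
          have hrep : List.replicate r (0 : Int) ++ (0 :: t) = List.replicate (r + 1) 0 ++ t := by
            rw [List.replicate_succ' (n := r)]; simp
          rw [runScan]
          simp [hlt, key, hrep]
      · have h0 : ¬ ((0 : Int) ≥ 3) := by omega
        rw [runScan]
        simp only [if_neg hx, if_neg h0]
        have base := ih 0 (by omega)
        simp only [Nat.cast_zero, List.replicate_zero, List.nil_append] at base
        rw [base]
        have hxb : (x == 0) = false := by simp [hx]
        interval_cases r
        · simp [hasTriple_cons_ne x t hx]
        · simp only [List.replicate_succ, List.replicate_zero, List.cons_append,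
            List.nil_append]
          match t with
          | [] => simp [hasTriple]
          | c :: t' => simp [hasTriple, hxb, hasTriple_cons_ne x (c :: t') hx]
        · simp only [List.replicate_succ, List.replicate_zero, List.cons_append,
            List.nil_append]
          match t with
          | [] => simp [hasTriple, hx]
          | c :: t' => simp [hasTriple, hxb, hasTriple_cons_ne x (c :: t') hx]

-- the zip/all over marks, in recursive form: last mark m, remaining marks, final mark n
def gapOk (m : Int) : List Int → Int → Bool
  | [], n => decide (n - m ≤ 3)
  | p :: ps, n => decide (p - m ≤ 3) && gapOk p ps n

theorem zip_all_gapOk (ps : List Int) : ∀ (m n : Int),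
    ((m :: (ps ++ [n])).zip (ps ++ [n])).all (fun p => decide (p.2 - p.1 ≤ 3))
      = gapOk m ps n := by
  induction ps with
  | nil => intro m n; simp [gapOk]
  | cons p ps' ih =>
      intro m n
      simp only [List.cons_append, List.zip_cons_cons, List.all_cons, gapOk]
      rw [ih p n]

theorem pvIdxFrom_lb (t : List Int) : ∀ (i : Int) (p : Int), p ∈ pvIdxFrom i t → i ≤ p := by
  induction t with
  | nil => intro i p h; simp [pvIdxFrom] at h
  | cons x t' ih =>
      intro i p h
      by_cases hx : x = 0
      · simp only [pvIdxFrom, hx, ne_eq, not_true_eq_false, if_false] at h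
        have := ih (i + 1) p h; omega
      · simp only [pvIdxFrom, if_pos hx, List.mem_cons] at h
        rcases h with h | h
        · omega
        · have := ih (i + 1) p h; omega

theorem gapOk_big (ps : List Int) (m n : Int) (hps : ∀ p ∈ ps, m + 4 ≤ p)
    (hn : m + 4 ≤ n) : gapOk m ps n = false := by
  cases ps with
  | nil => simp [gapOk]; omega
  | cons p ps' =>
      have := hps p (by simp)
      simp [gapOk]
      intro h; omega

theorem gapOk_runScan (t : List Int) : ∀ (i : Int) (r : Nat), r ≤ 2 →
    gapOk (i - 1 - r) (pvIdxFrom i t) (i + t.length) = ! runScan (r : Int) t := by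
  induction t with
  | nil =>
      intro i r hr
      simp [pvIdxFrom, gapOk, runScan]; omega
  | cons x t' ih =>
      intro i r hr
      by_cases hx : x = 0
      · subst hx
        by_cases h2 : r = 2
        · subst h2
          have hRS : runScan ((2 : Nat) : Int) (0 :: t') = true := by
            simp [runScan]
          rw [hRS]
          simp only [pvIdxFrom, ne_eq, not_true_eq_false, if_false, Bool.not_true]
          apply gapOk_big
          · intro p hp
            have := pvIdxFrom_lb t' (i + 1) p hp; omega
          · simp; omega
        · have hr1 : r + 1 ≤ 2 := by omega
          have hm : i - 1 - (r : Int) = (i + 1) - 1 - ((r + 1 : Nat) : Int) := by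
            push_cast; ring
          have hlen : i + ((0 : Int) :: t').length = (i + 1) + t'.length := by
            simp; ring
          rw [hlen]
          simp only [pvIdxFrom, ne_eq, not_true_eq_false, if_false]
          rw [hm, ih (i + 1) (r + 1) hr1]
          have hlt : ¬ ((r : Int) + 1 ≥ 3) := by omega
          simp [runScan, hlt]
      · simp only [pvIdxFrom, if_pos hx, gapOk]
        have hg : decide (i - (i - 1 - (r : Int)) ≤ 3) = true := by
          simp; omega
        have hlen : i + ((x : Int) :: t').length = (i + 1) + t'.length := by
          simp; ring
        have hm : i = (i + 1) - 1 - ((0 : Nat) : Int) := by push_cast; ring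
        rw [hg, hlen, Bool.true_and]
        nth_rewrite 1 [hm]
        rw [ih (i + 1) 0 (by omega)]
        have h0 : ¬ ((0 : Int) ≥ 3) := by omega
        simp [runScan, hx, h0]

theorem pvLacks_eq (lst : List Int) : pvLacks lst = ! hasTriple lst := by
  have h1 : pvLacks lst = gapOk (-1) (pvIdxFrom 0 lst) (lst.length : Int) := by
    unfold pvLacks pvMarks
    rw [List.tail_cons, zip_all_gapOk]
  have h2 := gapOk_runScan lst 0 0 (by omega)
  have h3 := runScan_eq lst 0 (by omega)
  simp only [Nat.cast_zero, List.replicate_zero, List.nil_append] at h2 h3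
  norm_num at h2
  rw [h1, h2, h3]

-- ===== VERDICT (by name: the statement is the Claim_ definition above) =====
theorem apply_left_right_spec : Claim_equal_apply_left_right := by
  intro center sightly_left sightly_right left right _
  unfold Spec_apply_left_right apply_left_right apply_left_right_alt
  simp only [pvScanA_eq, pvPickB, pvLacks_eq]
  by_cases h1 : hasTriple center <;>
    by_cases h2 : hasTriple sightly_left <;>
    by_cases h3 : hasTriple sightly_right <;>
    by_cases h4 : hasTriple left <;>
    by_cases h5 : hasTriple right <;>
    simp [h1, h2, h3, h4, h5]
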